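-- pv_equiv track=rewrite | github.com/ljbrown4/Intro-to-Python | ps3pr4.py | negate_last
-- ===== SOURCE A (Python) =====
-- def negate_last(n, values):
--     ''' takes in a number and a list and negates the last occurence of that number in the list'''
--     if values == []:
--         return values
--     elif n not in values:
--         return values
--     elif values[-1]==n:
--         return values[:-1] + [values[-1]*-1]
--     else:
--         before = negate_last(n, values[:-1])
--         return before + [values[-1]]
-- ===== SOURCE B (Python) =====
-- def negate_last(n, values):
--     '''takes in a number and a list and negates the last occurence of that number in the list'''
--     for i in range(len(values) - 1, -1, -1):
--         if values[i] == n: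
--             return values[:i] + [values[i] * -1] + values[i+1:]
--     return values
-- ===== Notes on version B (the rewrite author's own statement) =====
-- stated objective: simpler
-- what changed: Replaces A's end-peeling recursion (which slices and rebuilds the list at every level) with a single reverse index scan that finds the last occurrence and one splice of three slices.
import Mathlib
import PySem

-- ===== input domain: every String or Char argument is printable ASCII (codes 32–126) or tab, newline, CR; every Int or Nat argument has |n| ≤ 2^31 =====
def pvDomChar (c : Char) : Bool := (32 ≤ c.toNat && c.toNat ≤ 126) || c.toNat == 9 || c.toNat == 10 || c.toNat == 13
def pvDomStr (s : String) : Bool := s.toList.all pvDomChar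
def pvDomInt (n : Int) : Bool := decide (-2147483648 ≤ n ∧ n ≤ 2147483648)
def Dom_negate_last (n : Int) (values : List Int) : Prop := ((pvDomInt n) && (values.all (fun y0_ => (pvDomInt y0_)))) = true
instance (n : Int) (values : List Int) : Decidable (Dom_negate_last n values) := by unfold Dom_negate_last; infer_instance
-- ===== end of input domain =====

-- B replaces A's end-peeling recursion with one reverse index scan and a single splice.

-- ===== PORT A =====
def negate_last (n : Int) (values : List Int) : List Int :=
  if values = [] then values
  else if n ∉ values then values
  else if PySem.List.pyGetD values (-1) 0 = n then
    PySem.List.slice values none (some (-1)) ++ [PySem.List.pyGetD values (-1) 0 * -1]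
  else
    negate_last n (PySem.List.slice values none (some (-1))) ++ [PySem.List.pyGetD values (-1) 0]
termination_by values.length
decreasing_by
  simp [PySem.List.slice_to_neg_one]
  cases values with
  | nil => simp_all
  | cons x xs => simp

-- ===== PORT B =====
-- the reverse 'for i in range(len(values)-1, -1, -1)' loop with early return
def negateLastGo (n : Int) (values : List Int) : List Int → List Int
  | [] => values
  | i :: rest =>
    if PySem.List.pyGetD values i 0 = n then
      PySem.List.slice values none (some i) ++ [PySem.List.pyGetD values i 0 * -1]
        ++ PySem.List.slice values (some (i + 1)) none
    else negateLastGo n values rest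

def negate_last_alt (n : Int) (values : List Int) : List Int :=
  negateLastGo n values (PySem.List.pyRange ((values.length : Int) - 1) (-1) (-1))

-- ===== PRECONDITION & SPEC =====
def Spec_negate_last (n : Int) (values : List Int) (out : List Int) : Prop := out = negate_last_alt n values
instance (n : Int) (values : List Int) (out : List Int) : Decidable (Spec_negate_last n values out) := by unfold Spec_negate_last; infer_instance

-- ===== CLAIM (what is proved, stated in full; the proofs are below) =====
def Claim_equal_negate_last : Prop := ∀ (n : Int) (values : List Int), Dom_negate_last n values → Spec_negate_last n values (negate_last n values)

-- ===== LEMMAS AND PROOFS =====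

lemma negate_last_not_mem (n : Int) (vs : List Int) (h : n ∉ vs) : negate_last n vs = vs := by
  unfold negate_last
  cases vs with
  | nil => simp
  | cons x xs => simp [h]

-- A peels the last element: characterization on vs ++ [a]
lemma negate_last_append (n a : Int) (vs : List Int) :
    negate_last n (vs ++ [a]) = if a = n then vs ++ [a * -1] else negate_last n vs ++ [a] := by
  rw [negate_last]
  simp only [PySem.List.slice_to_neg_one, List.dropLast_concat,
    PySem.List.pyGetD_neg_one_append_singleton]
  by_cases ha : a = n
  · simp [ha]
  · by_cases hm : n ∈ vs
    · simp [ha, hm, Ne.symm ha]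
    · simp [ha, hm, Ne.symm ha, negate_last_not_mem n vs hm]

-- B's scan ignores an appended element while the indices stay inside vs
lemma negateLastGo_append (n a : Int) (vs : List Int) (is : List Int)
    (h : ∀ i ∈ is, 0 ≤ i ∧ i < (vs.length : Int)) :
    negateLastGo n (vs ++ [a]) is = negateLastGo n vs is ++ [a] := by
  induction is with
  | nil => simp [negateLastGo]
  | cons i rest ih =>
    obtain ⟨h0, hlt⟩ := h i (List.mem_cons_self ..)
    have hlt' : i.toNat < vs.length := by omega
    have hget : PySem.List.pyGetD (vs ++ [a]) i 0 = PySem.List.pyGetD vs i 0 := by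
      rw [PySem.List.pyGetD_eq_getElem (vs ++ [a]) 0 h0 (by simp; omega),
          PySem.List.pyGetD_eq_getElem vs 0 h0 (by exact_mod_cast hlt)]
      exact List.getElem_append_left hlt'
    simp only [negateLastGo, hget]
    split
    · rw [PySem.List.slice_to (vs ++ [a]) h0, PySem.List.slice_to vs h0,
          PySem.List.slice_from (vs ++ [a]) (by omega), PySem.List.slice_from vs (by omega)]
      rw [List.take_append_of_le_length (by omega),
          List.drop_append_of_le_length (by omega)]
      simp
    · exact ih (fun j hj => h j (List.mem_cons_of_mem _ hj))

lemma negate_last_alt_append (n a : Int) (vs : List Int) :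
    negate_last_alt n (vs ++ [a]) = if a = n then vs ++ [a * -1] else negate_last_alt n vs ++ [a] := by
  unfold negate_last_alt
  have hlen : ((vs ++ [a]).length : Int) - 1 = (vs.length : Int) := by simp
  rw [hlen, PySem.List.pyRange_neg_one_cons (by omega)]
  have hget : PySem.List.pyGetD (vs ++ [a]) (vs.length : Int) 0 = a := by
    rw [PySem.List.pyGetD_eq_getElem (vs ++ [a]) 0 (by omega) (by simp)]
    simp
  simp only [negateLastGo, hget]
  by_cases ha : a = n
  · simp only [ha, if_true]
    rw [PySem.List.slice_to (vs ++ [n]) (by omega), PySem.List.slice_from (vs ++ [n]) (by omega)]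
    simp
  · rw [if_neg ha, if_neg ha]
    rw [negateLastGo_append n a vs _ (fun i hi => by
      have := (PySem.List.mem_pyRange_neg_one).1 hi
      omega)]

lemma negate_last_eq_alt (n : Int) (values : List Int) :
    negate_last n values = negate_last_alt n values := by
  induction values using List.reverseRecOn with
  | nil =>
    rw [negate_last]
    simp [negate_last_alt, negateLastGo]
  | append_singleton vs a ih =>
    rw [negate_last_append, negate_last_alt_append]
    split
    · rfl
    · rw [ih]

-- ===== VERDICT (by name: the statement is the Claim_ definition above) =====
theorem negate_last_spec : Claim_equal_negate_last := by
  intro n values _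
  exact negate_last_eq_alt n values
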